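-- pv_equiv track=rewrite | github.com/hexszeug/bwinf-40-dev | 2_Runde/3_Aufgabe/dev/src/try1.py | bin_to_ssn
-- ===== SOURCE A (Python) =====
-- def bin_to_ssn(bin):
--     SSD_ENCODE = [0b1110111, 0b0010010, 0b1011101, 0b1011011, 0b0111010, 0b1101011, 0b1101111, 0b1010010, 0b1111111, 0b1111011, 0b1111110, 0b0101111, 0b1100101, 0b0011111, 0b1101101, 0b1101100]
--     ssn = 0b0
--     i = 0
--     while bin or i == 0:
--         digit = bin & 0b1111
--         ssn = ssn | (SSD_ENCODE[digit] << (7*i))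
--         bin = bin >> 4
--         i += 1
--     return ssn
-- ===== SOURCE B (Python) =====
-- def bin_to_ssn(bin):
--     SSD_ENCODE = [0b1110111, 0b0010010, 0b1011101, 0b1011011, 0b0111010, 0b1101011, 0b1101111, 0b1010010, 0b1111111, 0b1111011, 0b1111110, 0b0101111, 0b1100101, 0b0011111, 0b1101101, 0b1101100]
--     n = max(1, (bin.bit_length() + 3) // 4)
--     ssn = 0
--     for i in range(n - 1, -1, -1):
--         ssn = ssn * 128 + SSD_ENCODE[(bin >> (4 * i)) & 0xF]
--     return ssn
-- ===== Notes on version B (the rewrite author's own statement) =====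
-- stated objective: alternative
-- what changed: B computes the nibble count up front from bit_length and builds the result MSB-first with a Horner-style multiply-accumulate (ssn*128 + code), instead of A's LSB-first while loop OR-ing shifted codes while destructively shifting the input.
-- outside the precondition, e.g. on bin_to_ssn(-1): A does not finish within the time limit, B returns 108
import Mathlib
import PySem

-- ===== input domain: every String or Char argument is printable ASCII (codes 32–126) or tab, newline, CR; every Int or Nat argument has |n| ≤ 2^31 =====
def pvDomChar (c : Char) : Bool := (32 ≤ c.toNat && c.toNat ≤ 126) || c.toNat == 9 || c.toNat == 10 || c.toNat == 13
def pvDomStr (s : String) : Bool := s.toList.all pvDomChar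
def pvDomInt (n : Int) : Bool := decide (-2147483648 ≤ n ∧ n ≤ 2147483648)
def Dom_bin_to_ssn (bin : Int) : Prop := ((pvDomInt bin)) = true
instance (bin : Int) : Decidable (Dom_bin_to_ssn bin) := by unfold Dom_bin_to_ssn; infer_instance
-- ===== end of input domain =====

-- B replaces A's LSB-first while loop (OR-ing shifted codes while destructively shifting the
-- input) by an up-front nibble count from bit_length plus an MSB-first Horner multiply-accumulate;
-- same cost, different decomposition.


-- ===== PORT A =====
-- the 16-entry 7-segment table, shared literal of both Pythons
def ssdEncode : List Nat :=
  [0b1110111, 0b0010010, 0b1011101, 0b1011011, 0b0111010, 0b1101011, 0b1101111, 0b1010010,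
   0b1111111, 0b1111011, 0b1111110, 0b0101111, 0b1100101, 0b0011111, 0b1101101, 0b1101100]

-- A's while loop, step for step; state (bin, ssn, i).  On the admitted inputs (Pre_: bin ≥ 0)
-- Python's &, |, <<, >> on nonnegative ints coincide with Nat's bitwise operators used here.
def binToSsnLoop (b : Nat) (ssn : Nat) (i : Nat) : Nat :=
  if b ≠ 0 ∨ i = 0 then
    binToSsnLoop (b >>> 4) (ssn ||| ((ssdEncode.getD (b &&& 15) 0) <<< (7 * i))) (i + 1)
  else ssn
termination_by b + (if i = 0 then 1 else 0)
decreasing_by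
  have : b >>> 4 = b / 16 := by simp [Nat.shiftRight_eq_div_pow]
  rcases Nat.eq_zero_or_pos b with h | h
  · simp_all
  · simp_all
    omega

def bin_to_ssn (bin : Int) : Int := (binToSsnLoop bin.toNat 0 0 : Nat)

-- ===== PORT B =====
-- B's for-loop over range(n-1, -1, -1): k counts the remaining iterations, the current index is
-- k - 1.  Python-exact on Int: >> is Int's >>> (arithmetic shift), & 15 is PySem.Int.band,
-- bin.bit_length() is PySem.Int.bitLength.
def hornerLoopI (bin : Int) : Nat → Int → Int
  | 0, ssn => ssn
  | k + 1, ssn =>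
      hornerLoopI bin k
        (ssn * 128 + ((ssdEncode.getD (PySem.Int.band (bin >>> (4 * k)) 15).toNat 0 : Nat) : Int))

def bin_to_ssn_alt (bin : Int) : Int :=
  hornerLoopI bin (max 1 ((PySem.Int.bitLength bin + 3) / 4)) 0

-- ===== PRECONDITION & SPEC =====
-- A never returns on a negative argument: `bin >> 4` on a negative Python int is an arithmetic
-- shift that stabilises at -1, so the while condition stays true forever (A diverges);
-- Pre_ admits exactly the inputs on which A returns.
def Pre_bin_to_ssn (bin : Int) : Prop := 0 ≤ bin
instance (bin : Int) : Decidable (Pre_bin_to_ssn bin) := by unfold Pre_bin_to_ssn; infer_instance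
def pvWitness_bin_to_ssn : Int := (291)
def Spec_bin_to_ssn (bin : Int) (out : Int) : Prop := out = bin_to_ssn_alt bin
instance (bin : Int) (out : Int) : Decidable (Spec_bin_to_ssn bin out) := by unfold Spec_bin_to_ssn; infer_instance

-- ===== CLAIM (what is proved, stated in full; the proofs are below) =====
def Claim_equal_bin_to_ssn : Prop := ∀ (bin : Int), Dom_bin_to_ssn bin → Pre_bin_to_ssn bin → Spec_bin_to_ssn bin (bin_to_ssn bin)

-- ===== LEMMAS AND PROOFS =====

-- proof-side helpers: Nat versions of B's bit_length and Horner loop (equal to the port on casts)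
def bitLen (b : Nat) : Nat :=
  if b = 0 then 0 else bitLen (b / 2) + 1

def hornerLoop (b : Nat) : Nat → Nat → Nat
  | 0, ssn => ssn
  | k + 1, ssn => hornerLoop b k (ssn * 128 + ssdEncode.getD ((b >>> (4 * k)) &&& 15) 0)

theorem digit_cast (m k : Nat) :
    (PySem.Int.band ((m : Int) >>> (4 * k)) 15).toNat = (m >>> (4 * k)) &&& 15 := by
  have h : (m : Int) >>> (4 * k) = ((m >>> (4 * k) : Nat) : Int) := by
    simp [Int.shiftRight_eq, Int.natCast_shiftRight]
  have h15 : (15 : Int) = ((15 : Nat) : Int) := rfl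
  rw [h, h15, PySem.Int.band_natCast]
  simp

theorem hornerLoopI_cast (m : Nat) : ∀ (k : Nat) (sn : Nat),
    hornerLoopI (m : Int) k (sn : Int) = ((hornerLoop m k sn : Nat) : Int) := by
  intro k
  induction k with
  | zero => intro sn; rfl
  | succ k ih =>
    intro sn
    show hornerLoopI (m : Int) k _ = _
    have hc : ((sn : Int) * 128 + ((ssdEncode.getD (PySem.Int.band ((m : Int) >>> (4 * k)) 15).toNat 0 : Nat) : Int))
        = ((sn * 128 + ssdEncode.getD ((m >>> (4 * k)) &&& 15) 0 : Nat) : Int) := by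
      rw [digit_cast]
      push_cast
      ring
    rw [hc, ih]
    rfl

theorem bitLength_natCast_eq (m : Nat) : PySem.Int.bitLength (m : Int) = bitLen m := by
  induction m using Nat.strong_induction_on with
  | _ m ih =>
    rcases Nat.eq_zero_or_pos m with h | h
    · subst h; simp [PySem.Int.bitLength_zero, bitLen]
    · rw [PySem.Int.bitLength_natCast h, bitLen, if_neg (by omega),
          ih (m / 2) (Nat.div_lt_self h (by omega))]

-- shared reference value: the base-128 digit-by-digit encoding, LSB-first
def fRef (b : Nat) : Nat :=
  if b < 16 then ssdEncode.getD b 0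
  else ssdEncode.getD (b % 16) 0 + 128 * fRef (b / 16)
decreasing_by exact Nat.div_lt_self (by omega) (by omega)

theorem and15 (b : Nat) : b &&& 15 = b % 16 := by
  have := Nat.and_two_pow_sub_one_eq_mod b 4
  norm_num at this
  omega

theorem shr4 (b : Nat) : b >>> 4 = b / 16 := by
  simp [Nat.shiftRight_eq_div_pow]

theorem tab_lt (d : Nat) : ssdEncode.getD d 0 < 128 := by
  unfold ssdEncode
  rcases d with _|_|_|_|_|_|_|_|_|_|_|_|_|_|_|_|d <;> simp [List.getD]

theorem lor_add (k : ℕ) : ∀ a b : ℕ, a < 2 ^ k → a ||| (b * 2 ^ k) = a + b * 2 ^ k := by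
  induction k with
  | zero => intro a b h; interval_cases a; simp
  | succ k ih =>
    intro a b h
    have h2 : a / 2 < 2 ^ k := by omega
    have hb : a = Nat.bit (a % 2 == 1) (a / 2) := by
      simp [Nat.bit]; rcases Nat.mod_two_eq_zero_or_one a with h' | h' <;> simp [h'] <;> omega
    have hb2 : b * 2 ^ (k + 1) = Nat.bit false (b * 2 ^ k) := by
      simp [Nat.bit]; ring
    rw [hb, hb2, Nat.lor_bit, ih _ b h2]
    simp [Nat.bit]
    rcases Nat.mod_two_eq_zero_or_one a with h' | h' <;> simp [h'] <;> omega

theorem pow7 (i : Nat) : (2 : Nat) ^ (7 * i) = 128 ^ i := by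
  rw [pow_mul]; norm_num

-- A's loop computes fRef
theorem loopA_eq (b : Nat) : ∀ ssn i, (b ≠ 0 ∨ i = 0) → ssn < 128 ^ i →
    binToSsnLoop b ssn i = ssn + fRef b * 128 ^ i := by
  induction b using Nat.strong_induction_on with
  | _ b ih =>
    intro ssn i hcond hlt
    rw [binToSsnLoop, if_pos hcond]
    rw [shr4, and15]
    have hshift : (ssdEncode.getD (b % 16) 0) <<< (7 * i) = ssdEncode.getD (b % 16) 0 * 128 ^ i := by
      rw [Nat.shiftLeft_eq, pow7]
    have hor : ssn ||| (ssdEncode.getD (b % 16) 0) <<< (7 * i)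
        = ssn + ssdEncode.getD (b % 16) 0 * 128 ^ i := by
      rw [hshift, ← pow7 i]
      exact lor_add (7 * i) ssn _ (by rw [pow7]; exact hlt)
    rw [hor]
    by_cases hb : b < 16
    · -- after this step b / 16 = 0 and i+1 ≠ 0: the loop stops
      have : b / 16 = 0 := Nat.div_eq_of_lt hb
      rw [this, binToSsnLoop, if_neg (by omega)]
      rw [fRef, if_pos hb]
      have : b % 16 = b := Nat.mod_eq_of_lt hb
      rw [this]
    · have hdiv : b / 16 < b := Nat.div_lt_self (by omega) (by omega)
      have hne : b / 16 ≠ 0 := by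
        intro h0; exact hb (by omega)
      have hlt' : ssn + ssdEncode.getD (b % 16) 0 * 128 ^ i < 128 ^ (i + 1) := by
        have := tab_lt (b % 16)
        have h128 : (0:Nat) < 128 ^ i := pow_pos (by omega : (0:ℕ) < 128) i
        calc ssn + ssdEncode.getD (b % 16) 0 * 128 ^ i
            < 128 ^ i + 127 * 128 ^ i := by
              have : ssdEncode.getD (b % 16) 0 * 128 ^ i ≤ 127 * 128 ^ i :=
                Nat.mul_le_mul_right _ (by omega)
              omega
          _ = 128 ^ (i + 1) := by ring
      rw [ih (b / 16) hdiv _ (i + 1) (Or.inl hne) hlt']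
      have hf : fRef b = ssdEncode.getD (b % 16) 0 + 128 * fRef (b / 16) := by
        rw [fRef, if_neg hb]
      rw [hf]
      ring

theorem bitLen_zero : bitLen 0 = 0 := by rw [bitLen]; simp

theorem bitLen_div16 (b : Nat) (h : 16 ≤ b) : bitLen b = bitLen (b / 16) + 4 := by
  rw [bitLen, if_neg (by omega), bitLen, if_neg (by omega), bitLen, if_neg (by omega),
      bitLen, if_neg (by omega)]
  have h1 : b / 2 / 2 = b / 4 := by omega
  have h2 : b / 4 / 2 = b / 8 := by omega
  have h3 : b / 8 / 2 = b / 16 := by omega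
  rw [h1, h2, h3]

theorem bitLen_small (b : Nat) (h1 : 1 ≤ b) (h2 : b < 16) : (bitLen b + 3) / 4 = 1 := by
  interval_cases b <;> simp [bitLen]

theorem bitLen_pos (b : Nat) (h : 1 ≤ b) : 1 ≤ bitLen b := by
  rw [bitLen, if_neg (by omega)]; omega

-- number of base-16 digits B uses
def nib (b : Nat) : Nat := max 1 ((bitLen b + 3) / 4)

-- peeling off the least-significant digit of the MSB-first Horner loop
theorem hornerLoop_step (b : Nat) : ∀ k ssn,
    hornerLoop b (k + 1) ssn = hornerLoop (b / 16) k ssn * 128 + ssdEncode.getD (b % 16) 0 := by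
  intro k
  induction k generalizing b with
  | zero =>
    intro ssn
    simp [hornerLoop, and15]
  | succ k ih =>
    intro ssn
    have hdig : (b >>> (4 * (k + 1))) &&& 15 = ((b / 16) >>> (4 * k)) &&& 15 := by
      have : b >>> (4 * (k + 1)) = (b / 16) >>> (4 * k) := by
        rw [Nat.shiftRight_eq_div_pow, Nat.shiftRight_eq_div_pow, Nat.div_div_eq_div_mul]
        congr 1
        have h4 : 4 * (k + 1) = 4 * k + 4 := by ring
        rw [h4, pow_add]
        norm_num
        ring
      rw [this]
    show hornerLoop b (k + 1) (ssn * 128 + ssdEncode.getD ((b >>> (4 * (k+1))) &&& 15) 0) = _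
    rw [hdig, ih]
    rfl

theorem loopB_eq (b : Nat) : hornerLoop b (nib b) 0 = fRef b := by
  induction b using Nat.strong_induction_on with
  | _ b ih =>
    by_cases hb : b < 16
    · have hn : nib b = 1 := by
        unfold nib
        rcases Nat.eq_zero_or_pos b with h0 | h0
        · subst h0; simp [bitLen_zero]
        · rw [bitLen_small b h0 hb]
          omega
      rw [hn]
      show hornerLoop b 0 (0 * 128 + ssdEncode.getD ((b >>> (4 * 0)) &&& 15) 0) = fRef b
      have : b >>> (4 * 0) = b := by simp
      rw [this, and15, Nat.mod_eq_of_lt hb, fRef, if_pos hb]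
      simp [hornerLoop]
    · have h16 : 16 ≤ b := by omega
      have hdl : b / 16 < b := Nat.div_lt_self (by omega) (by omega)
      have hn : nib b = nib (b / 16) + 1 := by
        unfold nib
        rw [bitLen_div16 b h16]
        have hp : 1 ≤ bitLen (b / 16) := bitLen_pos _ (by omega)
        have h1 : (bitLen (b / 16) + 4 + 3) / 4 = (bitLen (b / 16) + 3) / 4 + 1 := by omega
        rw [h1]
        omega
      rw [hn, hornerLoop_step, ih (b / 16) hdl]
      have hf : fRef b = ssdEncode.getD (b % 16) 0 + 128 * fRef (b / 16) := by
        rw [fRef, if_neg hb]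
      rw [hf]
      ring

-- ===== VERDICT (by name: the statement is the Claim_ definition above) =====
theorem bin_to_ssn_spec : Claim_equal_bin_to_ssn := by
  intro bin _ hpre
  show bin_to_ssn bin = bin_to_ssn_alt bin
  obtain ⟨m, rfl⟩ := Int.eq_ofNat_of_zero_le hpre
  unfold bin_to_ssn bin_to_ssn_alt
  rw [bitLength_natCast_eq, Int.toNat_natCast,
      loopA_eq m 0 0 (Or.inr rfl) (by simp)]
  have h0 : (0 : Int) = ((0 : Nat) : Int) := rfl
  rw [h0, hornerLoopI_cast, ← nib, loopB_eq]
  simp
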